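-- pv_equiv track=rewrite | github.com/updaun/CodingTest | programmers/2023/231023_1.py | solution
-- ===== SOURCE A (Python) =====
-- def solution(input_string):
--     answer = ''
--     stack = []
--     for s in input_string:
--         if stack and s == stack[-1]:
--             continue
--         stack.append(s)
--     temp = set()
--     for i in stack:
--         if i not in temp:
--             temp.add(i)
--         else:
--             answer += i
--     if answer:
--         return "".join(sorted(list(set(answer))))
--     return "N"
-- ===== SOURCE B (Python) =====
-- def solution(input_string):
--     # Candidate-driven: for each distinct character, count the runs it starts
--     # by zipping the string against itself shifted by one; keep (sorted) the
--     # characters starting more than one run.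
--     chars = list(input_string)
--     pairs = list(zip([None] + chars, chars))
--     result = "".join(sorted(
--         c for c in set(chars)
--         if sum(1 for prev, ch in pairs if ch == c and ch != prev) > 1
--     ))
--     return result if result else "N"
-- ===== Notes on version B (the rewrite author's own statement) =====
-- stated objective: alternative
-- what changed: Replaces A's stream-driven three phases (build a collapsed stack, seen-set loop appending second occurrences, set+sort of that string) by a candidate-driven selection: iterate over the sorted distinct characters and keep each one that starts more than one run, counting run starts directly on the string zipped with its shift by one.
import Mathlib
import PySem

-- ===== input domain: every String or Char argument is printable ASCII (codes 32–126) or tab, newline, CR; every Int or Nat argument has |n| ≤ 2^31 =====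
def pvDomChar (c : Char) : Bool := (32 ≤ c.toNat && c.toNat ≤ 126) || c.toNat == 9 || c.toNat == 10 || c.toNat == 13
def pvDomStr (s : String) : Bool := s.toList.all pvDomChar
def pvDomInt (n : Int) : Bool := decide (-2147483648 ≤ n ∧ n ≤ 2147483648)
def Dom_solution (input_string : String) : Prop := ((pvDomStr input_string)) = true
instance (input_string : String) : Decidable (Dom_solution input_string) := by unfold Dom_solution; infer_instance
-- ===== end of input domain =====

-- B replaces A's stream-driven phases (collapse into a stack, seen-set loop building a duplicate
-- string, set+sort of that string) by a candidate-driven selection: for each distinct character,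
-- count the runs it starts on the string zipped with its shift by one, keep those with count > 1.

-- ===== PORT A =====
-- 'for s in input_string: if stack and s == stack[-1]: continue; stack.append(s)'
def solutionStack (cs : List Char) : List Char :=
  cs.foldl (fun stack s =>
    if !stack.isEmpty && (stack.getLast? == some s) then stack else stack ++ [s]) []

-- 'for i in stack: if i not in temp: temp.add(i) else: answer += i'  (state = (temp, answer))
def solutionTempAnswer (stack : List Char) : PySem.Set Char × List Char :=
  stack.foldl (fun (st : PySem.Set Char × List Char) i =>
    if !(PySem.Set.contains st.1 i) then (PySem.Set.add st.1 i, st.2) else (st.1, st.2 ++ [i]))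
    (PySem.Set.empty, [])

-- 'if answer: return "".join(sorted(list(set(answer)))); return "N"'
def solution (input_string : String) : String :=
  if (solutionTempAnswer (solutionStack input_string.toList)).2 ≠ [] then
    String.ofList (PySem.List.sorted
      (PySem.Set.ofList (solutionTempAnswer (solutionStack input_string.toList)).2) (fun x => x) false)
  else "N"

-- ===== PORT B =====
-- 'pairs = list(zip([None] + chars, chars))'
def solutionAltPairs (chars : List Char) : List (Option Char × Char) :=
  (none :: chars.map some).zip chars

-- 'sum(1 for prev, ch in pairs if ch == c and ch != prev)'
def solutionAltRunStarts (pairs : List (Option Char × Char)) (c : Char) : Int :=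
  pairs.foldl (fun n p => if p.2 == c && some p.2 != p.1 then n + 1 else n) 0

-- 'result = "".join(sorted(c for c in set(chars) if … > 1))'
def solutionAltResult (chars : List Char) : List Char :=
  PySem.List.sorted
    ((PySem.Set.ofList chars).filter (fun c => solutionAltRunStarts (solutionAltPairs chars) c > 1))
    (fun x => x) false

-- 'return result if result else "N"'
def solution_alt (input_string : String) : String :=
  if solutionAltResult input_string.toList ≠ [] then
    String.ofList (solutionAltResult input_string.toList)
  else "N"

-- ===== PRECONDITION & SPEC =====
def Spec_solution (input_string : String) (out : String) : Prop := out = solution_alt input_string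
instance (input_string : String) (out : String) : Decidable (Spec_solution input_string out) := by unfold Spec_solution; infer_instance

-- ===== CLAIM (what is proved, stated in full; the proofs are below) =====
def Claim_equal_solution : Prop := ∀ (input_string : String), Dom_solution input_string → Spec_solution input_string (solution input_string)

-- ===== LEMMAS AND PROOFS =====

-- B's run-start count for c equals the number of c's in A's collapsed stack.
theorem runStarts_eq (c : Char) (cs : List Char) :
    ∀ (st : List Char) (n : Int),
      ((st.getLast? :: cs.map some).zip cs).foldl
          (fun n p => if p.2 == c && some p.2 != p.1 then n + 1 else n) n
      = n + ((cs.foldl (fun stack s =>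
            if !stack.isEmpty && (stack.getLast? == some s) then stack else stack ++ [s]) st).count c : Int)
          - (st.count c : Int) := by
  induction cs with
  | nil => intro st n; simp
  | cons x xs ih =>
    intro st n
    simp only [List.map_cons, List.zip_cons_cons, List.foldl_cons]
    by_cases h : st.getLast? = some x
    · have hne : st ≠ [] := by intro he; rw [he] at h; simp at h
      have h2 : (if !st.isEmpty && (st.getLast? == some x) then st else st ++ [x]) = st :=
        if_pos (by simp [h, hne])
      have h1 : (if (x == c && some x != st.getLast?) = true then n + 1 else n) = n := by
        rw [h]; simp
      rw [h1, h2, ← h]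
      exact ih st n
    · have h2 : (if !st.isEmpty && (st.getLast? == some x) then st else st ++ [x]) = st ++ [x] := by
        rcases st with _ | _
        · rfl
        · simp only [List.isEmpty_cons, Bool.not_false, Bool.true_and, beq_iff_eq]
          rw [if_neg h]
      have hbne : (some x != st.getLast?) = true := by
        simp only [bne_iff_ne, ne_eq]
        exact fun hh => h hh.symm
      have h1 : (if (x == c && some x != st.getLast?) = true then n + 1 else n)
          = (if (x == c) = true then n + 1 else n) := by
        rw [hbne, Bool.and_true]
      rw [h1, h2]
      rw [show (some x) = (st ++ [x]).getLast? from (List.getLast?_concat).symm]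
      rw [ih (st ++ [x])]
      have hcnt : (((st ++ [x]).count c : Nat) : Int)
          = (st.count c : Int) + (if (x == c) = true then 1 else 0) := by
        by_cases hxc : x = c
        · subst hxc; simp [List.count_append]
        · simp [List.count_append, hxc]
      rw [hcnt]
      by_cases hxc : (x == c) = true
      · rw [if_pos hxc, if_pos hxc]; ring
      · rw [if_neg hxc, if_neg hxc]; ring

-- collapsing preserves the set of characters
theorem mem_stack (cs : List Char) :
    ∀ (st : List Char) (c : Char),
      c ∈ cs.foldl (fun stack s =>
            if !stack.isEmpty && (stack.getLast? == some s) then stack else stack ++ [s]) st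
      ↔ c ∈ st ∨ c ∈ cs := by
  induction cs with
  | nil => intro st c; simp
  | cons x xs ih =>
    intro st c
    simp only [List.foldl_cons]
    by_cases h : (!st.isEmpty && (st.getLast? == some x)) = true
    · rw [if_pos h]
      have hx : x ∈ st := by
        simp only [Bool.and_eq_true, beq_iff_eq] at h
        exact List.mem_of_getLast? h.2
      rw [ih st c]
      constructor
      · rintro (h1 | h2)
        · exact Or.inl h1
        · exact Or.inr (List.mem_cons_of_mem _ h2)
      · rintro (h1 | h2)
        · exact Or.inl h1
        · rcases List.mem_cons.mp h2 with rfl | h3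
          · exact Or.inl hx
          · exact Or.inr h3
    · rw [if_neg h, ih (st ++ [x]) c]
      simp [List.mem_append, or_assoc, List.mem_cons]
theorem tempAnswer_mem (stack : List Char) :
    ∀ (t : PySem.Set Char) (a : List Char) (c : Char),
      c ∈ (stack.foldl (fun (st : PySem.Set Char × List Char) i =>
            if !(PySem.Set.contains st.1 i) then (PySem.Set.add st.1 i, st.2) else (st.1, st.2 ++ [i]))
          (t, a)).2
      ↔ c ∈ a ∨ (c ∈ stack ∧ (c ∈ t ∨ 2 ≤ stack.count c)) := by
  induction stack with
  | nil => intro t a c; simp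
  | cons i rest ih =>
    intro t a c
    simp only [List.foldl_cons]
    by_cases hm : i ∈ t
    · rw [if_neg (by simp [hm])]
      rw [ih t (a ++ [i]) c]
      by_cases hc : c = i
      · subst hc
        simp [hm]
      · have hcnt : (i :: rest).count c = rest.count c := by
          simp [List.count_cons]; exact fun he => hc he.symm
        rw [hcnt]
        simp [List.mem_cons, hc]
    · rw [if_pos (by simp [hm])]
      rw [ih (PySem.Set.add t i) a c]
      by_cases hc : c = i
      · subst hc
        have hcnt : (c :: rest).count c = rest.count c + 1 := by simp
        constructor
        · rintro (ha | ⟨hr, _⟩)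
          · exact Or.inl ha
          · refine Or.inr ⟨by simp, Or.inr ?_⟩
            have := List.one_le_count_iff.mpr hr
            omega
        · rintro (ha | ⟨_, (ht | hcnt2)⟩)
          · exact Or.inl ha
          · exact absurd ht hm
          · exact Or.inr ⟨List.one_le_count_iff.mp (by omega), Or.inl (by simp [PySem.Set.mem_add])⟩
      · have hadd : c ∈ PySem.Set.add t i ↔ c ∈ t := by simp [PySem.Set.mem_add, hc]
        have hcnt : (i :: rest).count c = rest.count c := by
          simp [List.count_cons]; exact fun he => hc he.symm
        rw [hadd, hcnt]
        simp [List.mem_cons, hc]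

-- A character ends up in A's answer string iff it occurs at least twice in the stack.
theorem answer_mem (stack : List Char) (c : Char) :
    c ∈ (solutionTempAnswer stack).2 ↔ c ∈ stack ∧ 2 ≤ stack.count c := by
  rw [solutionTempAnswer, tempAnswer_mem stack PySem.Set.empty [] c]
  simp [PySem.Set.empty]

-- ===== VERDICT (by name: the statement is the Claim_ definition above) =====
theorem solution_spec : Claim_equal_solution := by
  intro s _
  unfold Spec_solution solution solution_alt solutionAltResult
  set cs := s.toList with hcs
  set stack := solutionStack cs with hstack
  set answer := (solutionTempAnswer stack).2 with hanswer
  have hpred : ∀ c, (solutionAltRunStarts (solutionAltPairs cs) c > 1)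
      ↔ 2 ≤ stack.count c := by
    intro c
    rw [solutionAltRunStarts, solutionAltPairs]
    have h0 : (none : Option Char) = ([] : List Char).getLast? := rfl
    rw [h0, runStarts_eq c cs [] 0]
    simp only [List.count_nil, hstack, solutionStack]
    omega
  have hperm : (PySem.Set.ofList answer).Perm
      ((PySem.Set.ofList cs).filter (fun c => solutionAltRunStarts (solutionAltPairs cs) c > 1)) := by
    rw [List.perm_ext_iff_of_nodup (PySem.Set.nodup_ofList answer)
      (List.Nodup.filter _ (PySem.Set.nodup_ofList cs))]
    intro c
    rw [PySem.Set.mem_ofList, List.mem_filter, PySem.Set.mem_ofList, hanswer, answer_mem]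
    have hmem : c ∈ stack ↔ c ∈ cs := by
      rw [hstack, solutionStack, mem_stack cs [] c]; simp
    constructor
    · rintro ⟨hm, hcnt⟩
      exact ⟨hmem.mp hm, by simpa [decide_eq_true_iff] using (hpred c).mpr hcnt⟩
    · rintro ⟨hm, hd⟩
      refine ⟨hmem.mpr hm, (hpred c).mp ?_⟩
      simpa [decide_eq_true_iff] using hd
  have hsorted : PySem.List.sorted (PySem.Set.ofList answer) (fun x => x) false
      = PySem.List.sorted
          ((PySem.Set.ofList cs).filter (fun c => solutionAltRunStarts (solutionAltPairs cs) c > 1))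
          (fun x => x) false :=
    (PySem.List.sorted_id_eq_sorted_id_iff_perm _ _).mpr hperm
  by_cases hne : answer = []
  · have hfil : (PySem.Set.ofList cs).filter (fun c => solutionAltRunStarts (solutionAltPairs cs) c > 1) = [] := by
      have := hperm
      rw [hne] at this
      exact (List.Perm.nil_eq (by simpa [PySem.Set.ofList] using this)).symm
    rw [hfil]
    simp [hne, PySem.List.sorted_eq_nil_iff]
  · have h2 : (PySem.Set.ofList cs).filter (fun c => solutionAltRunStarts (solutionAltPairs cs) c > 1) ≠ [] := by
      intro h0
      rw [h0] at hperm
      have hnilset := List.Perm.eq_nil hperm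
      rcases hne (by
        rcases answer with _ | ⟨x, xs⟩
        · rfl
        · exfalso
          have hx : x ∈ PySem.Set.ofList (x :: xs) := (PySem.Set.mem_ofList _ _).mpr (by simp)
          rw [hnilset] at hx
          simp at hx)
    rw [if_pos hne, if_pos (by simpa [PySem.List.sorted_eq_nil_iff] using h2), hsorted]
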